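-- pv_equiv track=rewrite | github.com/WAF2p/pass | wafpass/fixer.py | _count_braces
-- ===== SOURCE A (Python) =====
-- def _count_braces(line: str, brace: str) -> int:
--     """Count unquoted occurrences of `brace` ('{' or '}') in a line."""
--     count = 0
--     in_str = False
--     escape = False
--     for ch in line:
--         if escape:
--             escape = False
--             continue
--         if ch == "\\":
--             escape = True
--             continue
--         if ch == '"' and not escape:
--             in_str = not in_str
--             continue
--         if not in_str and ch == brace:
--             count += 1
--     return count
-- ===== SOURCE B (Python) =====
-- import re
--
-- # Pattern removes: a quoted region (with inner escapes, possibly unterminated,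
-- # possibly ending in a lone backslash), a backslash-escape pair, or a lone
-- # trailing backslash.  What is left is the unquoted, unescaped text.
-- _CLEAN = re.compile(r'"(?:\\.|[^"\\])*\\?"?|\\.|\\', re.DOTALL)
--
--
-- def _count_braces(line: str, brace: str) -> int:
--     """Count unquoted occurrences of `brace` ('{' or '}') in a line."""
--     cleaned = _CLEAN.sub("", line)
--     return sum(ch == brace for ch in cleaned)
-- ===== Notes on version B (the rewrite author's own statement) =====
-- stated objective: idiomatic
-- what changed: Replaces the per-character boolean state machine with a regex substitution that strips quoted regions and backslash-escape pairs, then counts brace characters in the cleaned text.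
import Mathlib
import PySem

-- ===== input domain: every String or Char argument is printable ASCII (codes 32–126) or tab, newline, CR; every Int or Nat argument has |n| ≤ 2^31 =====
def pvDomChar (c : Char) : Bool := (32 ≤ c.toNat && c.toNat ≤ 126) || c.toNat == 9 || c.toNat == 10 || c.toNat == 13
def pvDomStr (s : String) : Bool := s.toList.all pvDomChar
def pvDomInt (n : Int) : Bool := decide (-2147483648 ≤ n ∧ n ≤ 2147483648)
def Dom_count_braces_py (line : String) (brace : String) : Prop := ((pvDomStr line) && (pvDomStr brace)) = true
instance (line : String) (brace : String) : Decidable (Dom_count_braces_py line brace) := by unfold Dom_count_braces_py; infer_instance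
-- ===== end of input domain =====

-- B replaces A's per-character state machine by pattern removal (strip quoted
-- regions and escape pairs, then count) — objective: idiomatic.

-- ===== PORT A =====
-- the loop of A, as structural recursion over the same state (count, in_str, escape)
def cbGoA (brace : String) : List Char → Int → Bool → Bool → Int
  | [], count, _, _ => count
  | ch :: rest, count, in_str, escape =>
    if escape then cbGoA brace rest count in_str false
    else if ch = '\\' then cbGoA brace rest count in_str true
    else if ch = '"' ∧ ¬escape then cbGoA brace rest count (!in_str) escape
    else if ¬in_str ∧ String.mk [ch] = brace then cbGoA brace rest (count + 1) in_str escape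
    else cbGoA brace rest count in_str escape

def count_braces_py (line : String) (brace : String) : Int :=
  cbGoA brace line.toList 0 false false

-- ===== PORT B =====
-- port of B's regex substitution: remove quoted regions (with inner escapes,
-- possibly unterminated) and backslash-escape pairs; `cbClean` is outside a
-- string, `cbSkipStr` inside one
mutual
def cbClean : List Char → List Char
  | [] => []
  | '\\' :: _ :: rest => cbClean rest
  | ['\\'] => []
  | '"' :: rest => cbSkipStr rest
  | c :: rest => c :: cbClean rest

def cbSkipStr : List Char → List Char
  | [] => []
  | '\\' :: _ :: rest => cbSkipStr rest
  | ['\\'] => []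
  | '"' :: rest => cbClean rest
  | _ :: rest => cbSkipStr rest
end

-- port of `sum(ch == brace for ch in cleaned)`
def cbSum (brace : String) : List Char → Int
  | [] => 0
  | c :: rest => (if String.mk [c] = brace then 1 else 0) + cbSum brace rest

def count_braces_py_alt (line : String) (brace : String) : Int :=
  cbSum brace (cbClean line.toList)

-- ===== PRECONDITION & SPEC =====
def Spec_count_braces_py (line : String) (brace : String) (out : Int) : Prop := out = count_braces_py_alt line brace
instance (line : String) (brace : String) (out : Int) : Decidable (Spec_count_braces_py line brace out) := by unfold Spec_count_braces_py; infer_instance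

-- ===== CLAIM (what is proved, stated in full; the proofs are below) =====
def Claim_equal_count_braces_py : Prop := ∀ (line : String) (brace : String), Dom_count_braces_py line brace → Spec_count_braces_py line brace (count_braces_py line brace)

-- ===== LEMMAS AND PROOFS =====


theorem cbClean_cons_other {ch : Char} (hb : ch ≠ '\\') (hq : ch ≠ '"') (rest : List Char) :
    cbClean (ch :: rest) = ch :: cbClean rest := by
  unfold cbClean
  split <;> simp_all
  rw [cbClean.eq_def]

theorem cbSkipStr_cons_other {ch : Char} (hb : ch ≠ '\\') (hq : ch ≠ '"') (rest : List Char) :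
    cbSkipStr (ch :: rest) = cbSkipStr rest := by
  unfold cbSkipStr
  split <;> simp_all
  rw [cbSkipStr.eq_def]

-- joint loop invariant: A's machine with escape off equals the count over the
-- cleaned text, in both in_str modes
theorem cbGoA_invariant (brace : String) : ∀ n (l : List Char), l.length ≤ n →
    (∀ count : Int, cbGoA brace l count false false = count + cbSum brace (cbClean l)) ∧
    (∀ count : Int, cbGoA brace l count true false = count + cbSum brace (cbSkipStr l)) := by
  intro n
  induction n with
  | zero =>
    intro l hl
    have : l = [] := List.eq_nil_of_length_eq_zero (Nat.le_zero.mp hl)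
    subst this
    simp [cbGoA, cbClean, cbSkipStr, cbSum]
  | succ n ih =>
    intro l hl
    match l with
    | [] => simp [cbGoA, cbClean, cbSkipStr, cbSum]
    | ch :: rest =>
      have hrest : rest.length ≤ n := by simpa using Nat.lt_succ_iff.mp (by simpa using hl)
      constructor
      · intro count
        by_cases hb : ch = '\\'
        · subst hb
          match rest with
          | [] => simp [cbGoA, cbClean, cbSum]
          | c :: r =>
            have hr : r.length ≤ n := le_trans (by simp) hrest
            simp only [cbGoA, cbClean, if_true]
            simpa [cbGoA] using (ih r hr).1 count
        · by_cases hq : ch = '"'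
          · subst hq
            have := (ih rest hrest).2 count
            simp [cbGoA, cbClean, this]
          · by_cases hm : String.mk [ch] = brace
            · have h1 := (ih rest hrest).1 (count + 1)
              have h2 := (ih rest hrest).1 count
              simp [cbGoA, hb, hq, hm, cbClean_cons_other hb hq, cbSum, h1]
              ring
            · have h2 := (ih rest hrest).1 count
              simp [cbGoA, hb, hq, hm, cbClean_cons_other hb hq, cbSum, h2]
      · intro count
        by_cases hb : ch = '\\'
        · subst hb
          match rest with
          | [] => simp [cbGoA, cbSkipStr, cbSum]
          | c :: r =>
            have hr : r.length ≤ n := le_trans (by simp) hrest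
            simp only [cbGoA, cbSkipStr, if_true]
            simpa [cbGoA] using (ih r hr).2 count
        · by_cases hq : ch = '"'
          · subst hq
            have := (ih rest hrest).1 count
            simp [cbGoA, cbSkipStr, this]
          · have h2 := (ih rest hrest).2 count
            simp [cbGoA, hb, hq, cbSkipStr_cons_other hb hq, h2]

-- ===== VERDICT (by name: the statement is the Claim_ definition above) =====
theorem count_braces_py_spec : Claim_equal_count_braces_py := by
  intro line brace _
  show count_braces_py line brace = count_braces_py_alt line brace
  have := (cbGoA_invariant brace line.toList.length line.toList le_rfl).1 0
  simpa [count_braces_py, count_braces_py_alt] using this
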